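-- pv_equiv track=rewrite | github.com/pankaj1707k/data-structs | Miscellaneous/binary_inversion.py | numberOfInversions
-- ===== SOURCE A (Python) =====
-- def numberOfInversions(s: str, l: int) -> int:
--     ans = 0
--     num_ones = 0
--     for i in range(l):
--         if s[i] == '1':
--             num_ones += 1
--         else:
--             ans += num_ones
--     return ans
-- ===== SOURCE B (Python) =====
-- def numberOfInversions(s: str, l: int) -> int:
--     # Pass 1: prefix[i] = number of '1' chars among s[0..i-1]
--     prefix = []
--     c = 0
--     for i in range(l):
--         prefix.append(c)
--         if s[i] == '1':
--             c += 1
--     # Pass 2: for every non-'1' position add the ones before it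
--     ans = 0
--     for i in range(l):
--         if s[i] != '1':
--             ans += prefix[i]
--     return ans
-- ===== Notes on version B (the rewrite author's own statement) =====
-- stated objective: alternative
-- what changed: Replaces A's single interleaved accumulator loop by two passes: one builds a prefix table of running one-counts, the second sums the table entries at non-'1' positions.
import Mathlib
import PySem

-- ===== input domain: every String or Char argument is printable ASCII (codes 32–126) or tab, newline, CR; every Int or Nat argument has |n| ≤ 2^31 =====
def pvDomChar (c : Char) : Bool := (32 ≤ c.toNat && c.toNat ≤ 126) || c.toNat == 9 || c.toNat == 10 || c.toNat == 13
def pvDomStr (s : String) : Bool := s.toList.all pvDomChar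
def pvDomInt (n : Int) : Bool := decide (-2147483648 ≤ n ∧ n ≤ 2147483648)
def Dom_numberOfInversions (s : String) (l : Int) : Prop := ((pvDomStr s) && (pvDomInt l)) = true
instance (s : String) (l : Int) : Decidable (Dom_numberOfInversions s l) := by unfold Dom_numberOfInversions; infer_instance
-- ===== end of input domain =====

-- B replaces A's interleaved accumulator with two passes (build a prefix table of one-counts, then sum it at zero positions); alternative decomposition, same cost.


-- ===== PORT A =====
-- s[i] is PySem.List.pyGetD under Pre_ (each i in range(l) is in range since 0 ≤ i < l ≤ len s)
def numberOfInversions (s : String) (l : Int) : Int :=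
  let cs := s.toList
  let st := (PySem.List.pyRange 0 l 1).foldl
    (fun (p : Int × Int) i =>
      if PySem.List.pyGetD cs i ' ' = '1' then (p.1, p.2 + 1) else (p.1 + p.2, p.2))
    (0, 0)
  st.1

-- ===== PORT B =====
def numberOfInversions_alt (s : String) (l : Int) : Int :=
  let cs := s.toList
  -- pass 1: prefix table of running one-counts
  let pc := (PySem.List.pyRange 0 l 1).foldl
    (fun (q : List Int × Int) i =>
      (q.1 ++ [q.2], if PySem.List.pyGetD cs i ' ' = '1' then q.2 + 1 else q.2))
    ([], 0)
  -- pass 2: sum prefix entries at non-'1' positions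
  (PySem.List.pyRange 0 l 1).foldl
    (fun (a : Int) i =>
      if ¬ (PySem.List.pyGetD cs i ' ' = '1') then a + PySem.List.pyGetD pc.1 i 0 else a)
    0

-- ===== PRECONDITION & SPEC =====
-- Pre_: exactly the inputs where Python A returns (l > len(s) raises IndexError at s[i])
def Pre_numberOfInversions (s : String) (l : Int) : Prop := l ≤ (s.toList.length : Int)
instance (s : String) (l : Int) : Decidable (Pre_numberOfInversions s l) := by unfold Pre_numberOfInversions; infer_instance
def pvWitness_numberOfInversions : String × Int := ("10110", 5)

def Spec_numberOfInversions (s : String) (l : Int) (out : Int) : Prop := out = numberOfInversions_alt s l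
instance (s : String) (l : Int) (out : Int) : Decidable (Spec_numberOfInversions s l out) := by unfold Spec_numberOfInversions; infer_instance

-- ===== CLAIM (what is proved, stated in full; the proofs are below) =====
def Claim_equal_numberOfInversions : Prop := ∀ (s : String) (l : Int), Dom_numberOfInversions s l → Pre_numberOfInversions s l → Spec_numberOfInversions s l (numberOfInversions s l)

-- ===== LEMMAS AND PROOFS =====

-- count of '1' among the first n characters (matching both ports' running counter)
def pvCnt (cs : List Char) : Nat → Int
  | 0 => 0
  | n + 1 => pvCnt cs n + (if PySem.List.pyGetD cs (n : Int) ' ' = '1' then 1 else 0)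

-- A's answer accumulator as a closed recursion
def pvAns (cs : List Char) : Nat → Int
  | 0 => 0
  | n + 1 => pvAns cs n + (if PySem.List.pyGetD cs (n : Int) ' ' = '1' then 0 else pvCnt cs n)

theorem pv_foldA (cs : List Char) (n : Nat) :
    (PySem.List.pyRange 0 (n : Int) 1).foldl
      (fun (p : Int × Int) i =>
        if PySem.List.pyGetD cs i ' ' = '1' then (p.1, p.2 + 1) else (p.1 + p.2, p.2))
      (0, 0) = (pvAns cs n, pvCnt cs n) := by
  induction n with
  | zero => simp [PySem.List.pyRange_one_eq_nil, pvAns, pvCnt]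
  | succ n ih =>
      rw [show ((n + 1 : Nat) : Int) = (n : Int) + 1 by push_cast; ring,
        PySem.List.pyRange_one_succ_right (by positivity),
        List.foldl_append, ih]
      simp only [List.foldl_cons, List.foldl_nil, pvAns, pvCnt]
      split_ifs <;> simp

theorem pv_foldPr (cs : List Char) (n : Nat) :
    (PySem.List.pyRange 0 (n : Int) 1).foldl
      (fun (q : List Int × Int) i =>
        (q.1 ++ [q.2], if PySem.List.pyGetD cs i ' ' = '1' then q.2 + 1 else q.2))
      ([], 0) = ((List.range n).map (fun k => pvCnt cs k), pvCnt cs n) := by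
  induction n with
  | zero => simp [PySem.List.pyRange_one_eq_nil, pvCnt]
  | succ n ih =>
      rw [show ((n + 1 : Nat) : Int) = (n : Int) + 1 by push_cast; ring,
        PySem.List.pyRange_one_succ_right (by positivity),
        List.foldl_append, ih, List.range_succ]
      simp only [List.foldl_cons, List.foldl_nil, List.map_append, List.map_cons, List.map_nil,
        pvCnt]
      split_ifs <;> simp

theorem pv_pr_get (cs : List Char) (L k : Nat) (hk : k < L) :
    PySem.List.pyGetD ((List.range L).map (fun k => pvCnt cs k)) (k : Int) 0 = pvCnt cs k := by
  rw [PySem.List.pyGetD_natCast]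
  simp [List.getD, hk]

theorem pv_fold2 (cs : List Char) (L : Nat) (n : Nat) (hn : n ≤ L) :
    (PySem.List.pyRange 0 (n : Int) 1).foldl
      (fun (a : Int) i =>
        if ¬ (PySem.List.pyGetD cs i ' ' = '1') then
          a + PySem.List.pyGetD ((List.range L).map (fun k => pvCnt cs k)) i 0
        else a)
      0 = pvAns cs n := by
  induction n with
  | zero => simp [PySem.List.pyRange_one_eq_nil, pvAns]
  | succ n ih =>
      rw [show ((n + 1 : Nat) : Int) = (n : Int) + 1 by push_cast; ring,
        PySem.List.pyRange_one_succ_right (by positivity),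
        List.foldl_append, ih (by omega)]
      simp only [List.foldl_cons, List.foldl_nil, pvAns]
      rw [pv_pr_get cs L n (by omega)]
      split_ifs <;> simp

-- ===== VERDICT (by name: the statement is the Claim_ definition above) =====
theorem numberOfInversions_spec : Claim_equal_numberOfInversions := by
  intro s l _ _
  unfold Spec_numberOfInversions numberOfInversions numberOfInversions_alt
  by_cases hl : l ≤ 0
  · simp [PySem.List.pyRange_one_eq_nil hl]
  · have h : l = ((l.toNat : Nat) : Int) := by omega
    rw [h]
    simp only [pv_foldA, pv_foldPr, pv_fold2 s.toList l.toNat l.toNat le_rfl]
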